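-- pv_equiv track=rewrite | github.com/itsAmeMario0o/master_kilominx_solver | solver/move_notation.py | parse_algorithm
-- ===== SOURCE A (Python) =====
-- def parse_algorithm(algorithm):
--     """
--     Parse an algorithm string into individual moves.
--
--     Args:
--         algorithm (str): Algorithm string (e.g., "F U R F' U'").
--
--     Returns:
--         list: List of individual moves.
--     """
--     if not algorithm:
--         return []
--
--     # Split by spaces but preserve comments
--     parts = []
--     current_part = ""
--     in_comment = False
--
--     for char in algorithm:
--         if char == '#':
--             in_comment = True
--             if current_part:
--                 parts.append(current_part)
--                 current_part = "#"
--             else: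
--                 current_part = "#"
--         elif in_comment:
--             if char == '\n':
--                 in_comment = False
--                 parts.append(current_part)
--                 current_part = ""
--             else:
--                 current_part += char
--         elif char.isspace():
--             if current_part:
--                 parts.append(current_part)
--                 current_part = ""
--         else:
--             current_part += char
--
--     if current_part:
--         parts.append(current_part)
--
--     # Clean up and return the moves
--     return [part.strip() for part in parts if part.strip()]
-- ===== SOURCE B (Python) =====
-- def parse_algorithm(algorithm):
--     """Span-based tokenizer: jump over whole tokens by index instead of a char-by-char state machine."""
--     if not algorithm:
--         return []
--     parts = []
--     i, n = 0, len(algorithm)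
--     while i < n:
--         c = algorithm[i]
--         if c == '#':
--             j = i + 1
--             while j < n and algorithm[j] != '#' and algorithm[j] != '\n':
--                 j += 1
--             parts.append(algorithm[i:j])
--             i = j
--         elif c.isspace():
--             i += 1
--         else:
--             j = i
--             while j < n and not algorithm[j].isspace() and algorithm[j] != '#':
--                 j += 1
--             parts.append(algorithm[i:j])
--             i = j
--     return [p.strip() for p in parts if p.strip()]
-- ===== Notes on version B (the rewrite author's own statement) =====
-- stated objective: alternative
-- what changed: Replaced A's char-by-char state machine (parts/current_part/in_comment flag) with a span-based tokenizer that, at each position, emits a whole comment or move token in one jump (or skips one whitespace char), then applies the same strip/filter.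
import Mathlib
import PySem

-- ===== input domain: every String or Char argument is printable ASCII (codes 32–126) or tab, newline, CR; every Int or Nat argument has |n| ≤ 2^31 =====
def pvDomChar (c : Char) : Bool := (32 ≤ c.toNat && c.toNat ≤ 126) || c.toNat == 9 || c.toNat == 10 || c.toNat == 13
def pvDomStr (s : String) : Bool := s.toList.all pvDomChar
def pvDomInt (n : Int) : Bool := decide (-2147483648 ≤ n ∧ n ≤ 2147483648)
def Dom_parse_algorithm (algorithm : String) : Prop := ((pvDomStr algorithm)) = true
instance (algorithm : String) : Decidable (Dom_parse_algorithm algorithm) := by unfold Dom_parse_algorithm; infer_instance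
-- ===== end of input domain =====

-- B replaces A's char-by-char state machine (parts/current_part/in_comment) by a span-based
-- tokenizer that jumps whole tokens at a time; objective: simpler/alternative, same result.

-- ===== PORT A =====
-- A's loop state: remaining chars, parts, current_part, in_comment; the [] case is the final flush.
def pvLoopA : List Char → List (List Char) → List Char → Bool → List (List Char)
  | [], parts, cur, _ => if cur ≠ [] then parts ++ [cur] else parts
  | c :: cs, parts, cur, inc =>
    if c = '#' then
      if cur ≠ [] then pvLoopA cs (parts ++ [cur]) ['#'] true
      else pvLoopA cs parts ['#'] true
    else if inc then
      if c = '\n' then pvLoopA cs (parts ++ [cur]) [] false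
      else pvLoopA cs parts (cur ++ [c]) true
    else if PySem.Chars.isspace c then
      if cur ≠ [] then pvLoopA cs (parts ++ [cur]) [] false
      else pvLoopA cs parts [] false
    else pvLoopA cs parts (cur ++ [c]) false

def parse_algorithm (algorithm : String) : List String :=
  if algorithm = "" then []
  else
    let parts := pvLoopA algorithm.toList [] [] false
    (parts.filter (fun p => PySem.Chars.strip p ≠ [])).map (fun p => String.ofList (PySem.Chars.strip p))

-- ===== PORT B =====
-- comment-body predicate: chars up to the next '#' or newline
def pvPc (d : Char) : Bool := !(d == '#') && !(d == '\n')
-- word predicate: chars up to the next whitespace or '#'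
def pvPw (d : Char) : Bool := !(PySem.Chars.isspace d) && !(d == '#')

-- B's while loop: at each position emit a whole comment or word span, or skip one whitespace char
def pvTokB : List Char → List (List Char)
  | [] => []
  | c :: cs =>
    if c = '#' then ('#' :: cs.takeWhile pvPc) :: pvTokB (cs.dropWhile pvPc)
    else if PySem.Chars.isspace c then pvTokB cs
    else (c :: cs.takeWhile pvPw) :: pvTokB (cs.dropWhile pvPw)
termination_by cs => cs.length
decreasing_by
  all_goals simp only [List.length_cons]
  all_goals first
    | (have := List.length_dropWhile_le pvPc cs; omega)
    | (have := List.length_dropWhile_le pvPw cs; omega)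

def parse_algorithm_alt (algorithm : String) : List String :=
  if algorithm = "" then []
  else
    (pvTokB algorithm.toList).filter (fun p => PySem.Chars.strip p ≠ []) |>.map (fun p => String.ofList (PySem.Chars.strip p))

-- ===== PRECONDITION & SPEC =====
def Spec_parse_algorithm (algorithm : String) (out : List String) : Prop := out = parse_algorithm_alt algorithm
instance (algorithm : String) (out : List String) : Decidable (Spec_parse_algorithm algorithm out) := by unfold Spec_parse_algorithm; infer_instance

-- ===== CLAIM (what is proved, stated in full; the proofs are below) =====
def Claim_equal_parse_algorithm : Prop := ∀ (algorithm : String), Dom_parse_algorithm algorithm → Spec_parse_algorithm algorithm (parse_algorithm algorithm)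

-- ===== LEMMAS AND PROOFS =====

theorem pvLoopA_nil (parts : List (List Char)) (cur : List Char) (inc : Bool) :
    pvLoopA [] parts cur inc = if cur ≠ [] then parts ++ [cur] else parts := rfl

theorem pvLoopA_cons (c : Char) (cs : List Char) (parts : List (List Char)) (cur : List Char)
    (inc : Bool) :
    pvLoopA (c :: cs) parts cur inc =
      if c = '#' then
        if cur ≠ [] then pvLoopA cs (parts ++ [cur]) ['#'] true
        else pvLoopA cs parts ['#'] true
      else if inc then
        if c = '\n' then pvLoopA cs (parts ++ [cur]) [] false
        else pvLoopA cs parts (cur ++ [c]) true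
      else if PySem.Chars.isspace c then
        if cur ≠ [] then pvLoopA cs (parts ++ [cur]) [] false
        else pvLoopA cs parts [] false
      else pvLoopA cs parts (cur ++ [c]) false := rfl

theorem pvTokB_nil : pvTokB [] = [] := by rw [pvTokB]

theorem pvTokB_cons (c : Char) (cs : List Char) :
    pvTokB (c :: cs) =
      if c = '#' then ('#' :: cs.takeWhile pvPc) :: pvTokB (cs.dropWhile pvPc)
      else if PySem.Chars.isspace c then pvTokB cs
      else (c :: cs.takeWhile pvPw) :: pvTokB (cs.dropWhile pvPw) := by rw [pvTokB]

-- appended parts only accumulate at the front and can be pulled out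
theorem pvLoopA_pull (cs : List Char) : ∀ (parts : List (List Char)) (cur : List Char) (inc : Bool),
    pvLoopA cs parts cur inc = parts ++ pvLoopA cs [] cur inc := by
  induction cs with
  | nil => intro parts cur inc; simp only [pvLoopA_nil]; split <;> simp
  | cons c cs ih =>
    intro parts cur inc
    rw [pvLoopA_cons, pvLoopA_cons]
    split_ifs <;> (conv_lhs => rw [ih]) <;> (conv_rhs => rw [ih]) <;> simp

-- in-comment state: A consumes exactly the comment body, then continues clean
theorem pvLoopA_comment (cs : List Char) : ∀ (cur : List Char), cur ≠ [] →
    pvLoopA cs [] cur true =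
      (cur ++ cs.takeWhile pvPc) :: pvLoopA (cs.dropWhile pvPc) [] [] false := by
  induction cs with
  | nil => intro cur h; simp [pvLoopA_nil, h]
  | cons c cs ih =>
    intro cur h
    by_cases hc : c = '#'
    · subst hc
      have e1 : pvLoopA ('#' :: cs) [] cur true = [cur] ++ pvLoopA cs [] ['#'] true := by
        rw [pvLoopA_cons, if_pos rfl, if_pos h, pvLoopA_pull]; simp
      have e2 : pvLoopA ('#' :: cs) [] [] false = pvLoopA cs [] ['#'] true := by
        rw [pvLoopA_cons, if_pos rfl, if_neg (by simp)]
      have hpc : pvPc '#' = false := rfl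
      rw [e1, List.takeWhile_cons, List.dropWhile_cons, hpc]
      simp [e2]
    · by_cases hn : c = '\n'
      · subst hn
        have e1 : pvLoopA ('\n' :: cs) [] cur true = [cur] ++ pvLoopA cs [] [] false := by
          rw [pvLoopA_cons, if_neg (by decide), if_pos rfl, if_pos rfl, pvLoopA_pull]; simp
        have e2 : pvLoopA ('\n' :: cs) [] [] false = pvLoopA cs [] [] false := by
          rw [pvLoopA_cons, if_neg (by decide), if_neg (by simp), if_pos (by decide),
            if_neg (by simp)]
        have hpc : pvPc '\n' = false := rfl
        rw [e1, List.takeWhile_cons, List.dropWhile_cons, hpc]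
        simp [e2]
      · have hpc : pvPc c = true := by simp [pvPc, hc, hn]
        have e1 : pvLoopA (c :: cs) [] cur true = pvLoopA cs [] (cur ++ [c]) true := by
          rw [pvLoopA_cons, if_neg hc, if_pos rfl, if_neg hn]
        rw [e1, ih (cur ++ [c]) (by simp), List.takeWhile_cons, List.dropWhile_cons, hpc]
        simp

-- in-word state: A consumes exactly the word run, then continues clean
theorem pvLoopA_word (cs : List Char) : ∀ (cur : List Char), cur ≠ [] →
    pvLoopA cs [] cur false =
      (cur ++ cs.takeWhile pvPw) :: pvLoopA (cs.dropWhile pvPw) [] [] false := by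
  induction cs with
  | nil => intro cur h; simp [pvLoopA_nil, h]
  | cons c cs ih =>
    intro cur h
    by_cases hc : c = '#'
    · subst hc
      have e1 : pvLoopA ('#' :: cs) [] cur false = [cur] ++ pvLoopA cs [] ['#'] true := by
        rw [pvLoopA_cons, if_pos rfl, if_pos h, pvLoopA_pull]; simp
      have e2 : pvLoopA ('#' :: cs) [] [] false = pvLoopA cs [] ['#'] true := by
        rw [pvLoopA_cons, if_pos rfl, if_neg (by simp)]
      have hpw : pvPw '#' = false := rfl
      rw [e1, List.takeWhile_cons, List.dropWhile_cons, hpw]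
      simp [e2]
    · by_cases hs : PySem.Chars.isspace c = true
      · have e1 : pvLoopA (c :: cs) [] cur false = [cur] ++ pvLoopA cs [] [] false := by
          rw [pvLoopA_cons, if_neg hc, if_neg (by simp), if_pos hs, if_pos h, pvLoopA_pull]; simp
        have e2 : pvLoopA (c :: cs) [] [] false = pvLoopA cs [] [] false := by
          rw [pvLoopA_cons, if_neg hc, if_neg (by simp), if_pos hs, if_neg (by simp)]
        have hpw : pvPw c = false := by simp [pvPw, hs]
        rw [e1, List.takeWhile_cons, List.dropWhile_cons, hpw]
        simp [e2]
      · have hpw : pvPw c = true := by simp [pvPw, hs, hc]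
        have e1 : pvLoopA (c :: cs) [] cur false = pvLoopA cs [] (cur ++ [c]) false := by
          rw [pvLoopA_cons, if_neg hc, if_neg (by simp), if_neg hs]
        rw [e1, ih (cur ++ [c]) (by simp), List.takeWhile_cons, List.dropWhile_cons, hpw]
        simp

-- clean state: A's state machine produces exactly B's token spans
theorem pvLoopA_eq_pvTokB_aux : ∀ (n : Nat) (cs : List Char), cs.length ≤ n →
    pvLoopA cs [] [] false = pvTokB cs := by
  intro n
  induction n with
  | zero =>
    intro cs h
    rw [List.length_eq_zero_iff.mp (Nat.le_zero.mp h), pvLoopA_nil, pvTokB_nil]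
    simp
  | succ n ih =>
    intro cs h
    match cs with
    | [] => rw [pvLoopA_nil, pvTokB_nil]; simp
    | c :: cs =>
      simp only [List.length_cons, Nat.succ_le_succ_iff] at h
      rw [pvTokB_cons]
      by_cases hc : c = '#'
      · subst hc
        rw [if_pos rfl]
        rw [show pvLoopA ('#' :: cs) [] [] false = pvLoopA cs [] ['#'] true from by
          rw [pvLoopA_cons, if_pos rfl, if_neg (by simp)]]
        rw [pvLoopA_comment cs ['#'] (by simp)]
        rw [ih (cs.dropWhile pvPc) (le_trans (List.length_dropWhile_le _ _) h)]
        simp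
      · rw [if_neg hc]
        by_cases hs : PySem.Chars.isspace c = true
        · rw [if_pos hs]
          rw [show pvLoopA (c :: cs) [] [] false = pvLoopA cs [] [] false from by
            rw [pvLoopA_cons, if_neg hc, if_neg (by simp), if_pos hs, if_neg (by simp)]]
          exact ih cs h
        · rw [if_neg hs]
          rw [show pvLoopA (c :: cs) [] [] false = pvLoopA cs [] [c] false from by
            rw [pvLoopA_cons, if_neg hc, if_neg (by simp), if_neg hs]; simp]
          rw [pvLoopA_word cs [c] (by simp)]
          rw [ih (cs.dropWhile pvPw) (le_trans (List.length_dropWhile_le _ _) h)]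
          simp

-- ===== VERDICT (by name: the statement is the Claim_ definition above) =====
theorem parse_algorithm_spec : Claim_equal_parse_algorithm := by
  intro algorithm _
  unfold Spec_parse_algorithm parse_algorithm parse_algorithm_alt
  by_cases he : algorithm = ""
  · simp [he]
  · simp only [if_neg he]
    rw [pvLoopA_eq_pvTokB_aux algorithm.toList.length algorithm.toList le_rfl]
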